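-- pv_equiv track=rewrite | github.com/Pizza-Ria/smartsimfork | smartsim/launcher/lsf/lsfParser.py | parse_bsub_error
-- ===== SOURCE A (Python) =====
-- def parse_bsub_error(output):
--     """Parse and return error output of a failed bsub command.
--
--     :param output: stderr of qsub command
--     :type output: str
--     :returns: error message
--     :rtype: str
--     """
--     # Search for first non-empty line
--     output_lines = output.split("\n")
--     for line_num, line in enumerate(output.split("\n")):
--         if line.strip():
--             error = "\n".join(output_lines[line_num:])
--             return error.strip()
--
--     # if no non-empty line was received,
--     # present a base error message
--     base_err = "LSF run error"
--     return base_err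
-- ===== SOURCE B (Python) =====
-- def parse_bsub_error(output):
--     """Parse and return error output of a failed bsub command.
--
--     :param output: stderr of qsub command
--     :type output: str
--     :returns: error message
--     :rtype: str
--     """
--     # All lines before the first non-empty line are whitespace-only, so
--     # stripping the whole output equals joining from that line and stripping.
--     return output.strip() or "LSF run error"
-- ===== Notes on version B (the rewrite author's own statement) =====
-- stated objective: simpler
-- what changed: Replaces the line-by-line scan (split, enumerate, find first non-blank line, re-join the tail, strip) with a single closed-form strip of the whole output, falling back to the base error message when the stripped result is empty.
import Mathlib
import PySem

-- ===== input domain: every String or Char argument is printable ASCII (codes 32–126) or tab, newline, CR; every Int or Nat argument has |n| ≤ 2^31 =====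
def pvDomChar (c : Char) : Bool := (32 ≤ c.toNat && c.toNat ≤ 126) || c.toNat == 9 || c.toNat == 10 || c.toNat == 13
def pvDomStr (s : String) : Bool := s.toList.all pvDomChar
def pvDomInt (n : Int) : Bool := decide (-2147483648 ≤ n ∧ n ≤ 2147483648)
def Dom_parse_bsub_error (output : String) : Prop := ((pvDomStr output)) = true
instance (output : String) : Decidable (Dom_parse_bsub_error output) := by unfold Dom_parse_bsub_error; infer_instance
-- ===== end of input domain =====

-- B replaces A's split/enumerate/re-join scan for the first non-blank line by a single
-- strip of the whole output with the base message as fallback (objective: simpler).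

-- ===== PORT A =====
def pbeLoop (output_lines : List String) : List (Int × String) → String
  | [] => "LSF run error"
  | (line_num, line) :: rest =>
    if PySem.Str.strip line ≠ "" then
      PySem.Str.strip (PySem.Str.join "\n" (PySem.List.slice output_lines (some line_num) none))
    else pbeLoop output_lines rest

def parse_bsub_error (output : String) : String :=
  let output_lines := (PySem.Str.split? output "\n").getD []
  pbeLoop output_lines (PySem.List.enumerate output_lines)

-- ===== PORT B =====
def parse_bsub_error_alt (output : String) : String :=
  let stripped := PySem.Str.strip output
  if stripped ≠ "" then stripped else "LSF run error"

-- ===== PRECONDITION & SPEC =====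
def Spec_parse_bsub_error (output : String) (out : String) : Prop := out = parse_bsub_error_alt output
instance (output : String) (out : String) : Decidable (Spec_parse_bsub_error output out) := by unfold Spec_parse_bsub_error; infer_instance

-- ===== CLAIM (what is proved, stated in full; the proofs are below) =====
def Claim_equal_parse_bsub_error : Prop := ∀ (output : String), Dom_parse_bsub_error output → Spec_parse_bsub_error output (parse_bsub_error output)

-- ===== LEMMAS AND PROOFS =====

lemma go_zero (sep : List Char) (l cur : List Char) (acc : List (List Char)) :
    PySem.Chars.splitOn.go sep 0 l cur acc = ((cur.reverse ++ l) :: acc).reverse := by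
  rw [PySem.Chars.splitOn.go]

lemma go_nil (sep : List Char) (fuel : Nat) (cur : List Char) (acc : List (List Char)) :
    PySem.Chars.splitOn.go sep (fuel+1) [] cur acc = (cur.reverse :: acc).reverse := by
  rw [PySem.Chars.splitOn.go]; omega

lemma go_cons (sep : List Char) (fuel : Nat) (c : Char) (rest cur : List Char) (acc : List (List Char)) :
    PySem.Chars.splitOn.go sep (fuel+1) (c::rest) cur acc =
      if sep.isPrefixOf (c::rest) then
        PySem.Chars.splitOn.go sep fuel (List.drop sep.length (c::rest)) [] (cur.reverse :: acc)
      else PySem.Chars.splitOn.go sep fuel rest (c :: cur) acc := by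
  rw [PySem.Chars.splitOn.go]

lemma go_acc (sep : List Char) : ∀ (fuel : Nat) (l cur : List Char) (acc : List (List Char)),
    PySem.Chars.splitOn.go sep fuel l cur acc = acc.reverse ++ PySem.Chars.splitOn.go sep fuel l cur [] := by
  intro fuel
  induction fuel with
  | zero => intro l cur acc; simp [go_zero]
  | succ n ih =>
    intro l cur acc
    cases l with
    | nil => simp [go_nil]
    | cons c rest =>
      rw [go_cons, go_cons]
      split_ifs with h
      · rw [ih _ _ (cur.reverse :: acc), ih _ _ ([cur.reverse])]
        simp
      · rw [ih rest (c::cur) acc]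

lemma go_ne_nil (sep : List Char) : ∀ (fuel : Nat) (l cur : List Char) (acc : List (List Char)),
    PySem.Chars.splitOn.go sep fuel l cur acc ≠ [] := by
  intro fuel
  induction fuel with
  | zero => intro l cur acc; simp [go_zero]
  | succ n ih =>
    intro l cur acc
    cases l with
    | nil => simp [go_nil]
    | cons c rest =>
      rw [go_cons]
      split_ifs with h
      · exact ih _ _ _
      · exact ih _ _ _

lemma intercalate_cons_ne {α : Type} (sep x : List α) (T : List (List α)) (h : T ≠ []) :
    sep.intercalate (x :: T) = x ++ sep ++ sep.intercalate T := by
  cases T with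
  | nil => exact absurd rfl h
  | cons b t => simp [List.intercalate]

lemma go_intercalate (c : Char) : ∀ (fuel : Nat) (l cur : List Char),
    l.length ≤ fuel →
    [c].intercalate (PySem.Chars.splitOn.go [c] fuel l cur []) = cur.reverse ++ l := by
  intro fuel
  induction fuel with
  | zero =>
    intro l cur h
    have : l = [] := by cases l <;> simp_all
    subst this
    simp [go_zero, List.intercalate]
  | succ n ih =>
    intro l cur h
    cases l with
    | nil => simp [go_nil, List.intercalate]
    | cons x rest =>
      rw [go_cons]
      split_ifs with hp
      · have hx : c = x := by simpa [List.isPrefixOf] using hp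
        subst hx
        rw [go_acc]
        simp only [List.reverse_cons, List.reverse_nil, List.nil_append, List.singleton_append,
          List.length_cons, List.length_nil, List.drop_succ_cons, List.drop_zero]
        rw [intercalate_cons_ne _ _ _ (go_ne_nil _ _ _ _ _)]
        have := ih rest [] (by simpa using Nat.lt_succ_iff.mp (by simpa using h))
        simp only [List.reverse_nil] at this
        simp [this]
      · have := ih rest (x::cur) (by simpa using Nat.lt_succ_iff.mp (by simpa using h))
        rw [this]; simp

lemma splitOn_intercalate (cs : List Char) (c : Char) :
    [c].intercalate (PySem.Chars.splitOn cs [c]) = cs := by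
  unfold PySem.Chars.splitOn
  simpa using go_intercalate c (cs.length + 1) cs [] (by omega)

lemma strip_eq_nil_iff (l : List Char) :
    PySem.Chars.strip l = [] ↔ ∀ x ∈ l, PySem.Chars.isspace x = true := by
  unfold PySem.Chars.strip PySem.Chars.rstrip PySem.Chars.lstrip
  simp only [List.reverse_eq_nil_iff, List.dropWhile_eq_nil_iff, List.mem_reverse]
  constructor
  · intro h x hx
    rcases List.mem_append.mp ((List.takeWhile_append_dropWhile (p := PySem.Chars.isspace) (l := l)) ▸ hx) with h1 | h2
    · exact List.mem_takeWhile_imp h1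
    · exact h x h2
  · intro h x hx
    exact h x ((List.dropWhile_sublist _).subset hx)

lemma intercalate_all_ws : ∀ (L : List (List Char)),
    (∀ l ∈ L, ∀ x ∈ l, PySem.Chars.isspace x = true) →
    ∀ x ∈ [ '\n' ].intercalate L, PySem.Chars.isspace x = true := by
  intro L
  induction L with
  | nil => simp [List.intercalate]
  | cons a t ih =>
    intro h x hx
    cases t with
    | nil =>
      simp [List.intercalate] at hx
      exact h a (by simp) x hx
    | cons b t' =>
      rw [intercalate_cons_ne _ _ _ (by simp)] at hx
      rcases List.mem_append.mp hx with h1 | h2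
      · rcases List.mem_append.mp h1 with h3 | h4
        · exact h a (by simp) x h3
        · simp at h4; subst h4; decide
      · exact ih (fun l hl => h l (by simp [hl])) x h2

lemma lstrip_append (a b : List Char) (h : ∀ x ∈ a, PySem.Chars.isspace x = true) :
    PySem.Chars.lstrip (a ++ b) = PySem.Chars.lstrip b := by
  unfold PySem.Chars.lstrip
  rw [List.dropWhile_append, if_pos]
  simpa [List.isEmpty_iff, List.dropWhile_eq_nil_iff] using h

lemma lstrip_intercalate_drop : ∀ (k : Nat) (L : List (List Char)),
    L.drop k ≠ [] →
    (∀ l ∈ L.take k, ∀ x ∈ l, PySem.Chars.isspace x = true) →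
    PySem.Chars.lstrip ([ '\n' ].intercalate L) = PySem.Chars.lstrip ([ '\n' ].intercalate (L.drop k)) := by
  intro k
  induction k with
  | zero => simp
  | succ n ih =>
    intro L h1 h2
    cases L with
    | nil => simp at h1
    | cons x xs =>
      simp only [List.drop_succ_cons] at h1 ⊢
      have hxs : xs ≠ [] := by intro e; rw [e] at h1; simp at h1
      rw [intercalate_cons_ne _ _ _ hxs, lstrip_append]
      · exact ih xs h1 (fun l hl => h2 l (by simp [hl]))
      · intro y hy
        rcases List.mem_append.mp hy with h3 | h4
        · exact h2 x (by simp) y h3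
        · simp at h4; subst h4; decide

lemma strip_intercalate_drop (k : Nat) (L : List (List Char))
    (h1 : L.drop k ≠ [])
    (h2 : ∀ l ∈ L.take k, ∀ x ∈ l, PySem.Chars.isspace x = true) :
    PySem.Chars.strip ([ '\n' ].intercalate L) = PySem.Chars.strip ([ '\n' ].intercalate (L.drop k)) := by
  unfold PySem.Chars.strip
  rw [lstrip_intercalate_drop k L h1 h2]

lemma mem_intercalate_head (a : List Char) (t : List (List Char)) (x : Char) (hx : x ∈ a) :
    x ∈ [ '\n' ].intercalate (a :: t) := by
  cases t with
  | nil => simpa [List.intercalate] using hx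
  | cons b t' => rw [intercalate_cons_ne _ _ _ (by simp)]; simp [hx]

lemma loop_eq (output : String) (L : List (List Char))
    (hL : [ '\n' ].intercalate L = output.toList) :
    ∀ (tl : List (List Char)) (k : Nat),
      tl = L.drop k →
      (∀ l ∈ L.take k, ∀ x ∈ l, PySem.Chars.isspace x = true) →
      pbeLoop (L.map String.ofList) (PySem.List.enumerate (tl.map String.ofList) k) = parse_bsub_error_alt output := by
  intro tl
  induction tl with
  | nil =>
    intro k htl h2
    have hlen : L.length ≤ k := List.drop_eq_nil_iff.mp htl.symm
    have hall : ∀ l ∈ L, ∀ x ∈ l, PySem.Chars.isspace x = true := by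
      rw [← List.take_of_length_le hlen]; exact h2
    have hnil : PySem.Chars.strip output.toList = [] :=
      (strip_eq_nil_iff _).mpr (by rw [← hL]; exact intercalate_all_ws L hall)
    have hs : PySem.Str.strip output = "" := by
      rw [PySem.Str.strip.eq_1, hnil]
    unfold parse_bsub_error_alt
    simp [hs, pbeLoop]
  | cons a t ih =>
    intro k htl h2
    have hstep : PySem.List.enumerate ((a::t).map String.ofList) k
        = ((k : Int), String.ofList a) :: PySem.List.enumerate (t.map String.ofList) ((k:Int)+1) := by
      simp
    rw [hstep]
    by_cases hcond : PySem.Str.strip (String.ofList a) = ""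
    · have ha : ∀ x ∈ a, PySem.Chars.isspace x = true := by
        rw [PySem.Str.strip.eq_1] at hcond
        exact (strip_eq_nil_iff a).mp (by simpa using hcond)
      have hcast : ((k : Int) + 1) = ((k+1 : Nat) : Int) := by push_cast; ring
      rw [pbeLoop, if_neg (by simpa using hcond), hcast]
      apply ih (k+1)
      · rw [← List.tail_drop, ← htl]; rfl
      · intro l hl
        rw [List.take_add_one] at hl
        rcases List.mem_append.mp hl with h3 | h4
        · exact h2 l h3
        · have : L[k]? = some a := by rw [← List.head?_drop, ← htl]; rfl
          rw [this] at h4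
          simp at h4; subst h4; exact ha
    · have hdropk : L.drop k ≠ [] := by rw [← htl]; simp
      have hchar : PySem.Chars.strip output.toList = PySem.Chars.strip ([ '\n' ].intercalate (a::t)) := by
        rw [← hL, strip_intercalate_drop k L hdropk h2, ← htl]
      have hnonws : ¬ ∀ x ∈ a, PySem.Chars.isspace x = true := by
        intro hws
        have hnil' : PySem.Chars.strip a = [] := (strip_eq_nil_iff a).mpr hws
        exact hcond (by rw [PySem.Str.strip.eq_1]; simp [hnil'])
      have hne : PySem.Str.strip output ≠ "" := by
        intro e
        have he : PySem.Chars.strip output.toList = [] := by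
          rw [PySem.Str.strip.eq_1] at e; simpa using e
        rw [hchar] at he
        exact hnonws (fun x hx => (strip_eq_nil_iff _).mp he x (mem_intercalate_head a t x hx))
      rw [pbeLoop, if_pos (by simpa using hcond)]
      have hslice : PySem.List.slice (L.map String.ofList) (some (k:Int)) none
          = (a::t).map String.ofList := by
        rw [PySem.List.slice_from _ (Int.natCast_nonneg k)]
        simp only [Int.toNat_natCast]; rw [← List.map_drop, ← htl]
      rw [hslice]
      have hV : PySem.Str.strip (PySem.Str.join "\n" ((a::t).map String.ofList)) = PySem.Str.strip output := by
        rw [PySem.Str.strip.eq_1, PySem.Str.strip.eq_1]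
        congr 1
        rw [PySem.Str.toList_join]
        have hmap : (List.map String.ofList (a::t)).map String.toList = a::t := by
          simp [Function.comp_def]
        rw [hmap]
        exact hchar.symm
      rw [hV]
      unfold parse_bsub_error_alt
      simp [hne]

-- ===== VERDICT (by name: the statement is the Claim_ definition above) =====
theorem parse_bsub_error_spec : Claim_equal_parse_bsub_error := by
  intro output _
  unfold Spec_parse_bsub_error parse_bsub_error
  have hsplit : (PySem.Str.split? output "\n").getD []
      = (PySem.Chars.splitOn output.toList ['\n']).map String.ofList := by
    rw [PySem.Str.split?.eq_1]
    rw [PySem.Chars.split?.eq_1]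
    simp
  rw [hsplit]
  have hL : [ '\n' ].intercalate (PySem.Chars.splitOn output.toList ['\n']) = output.toList :=
    splitOn_intercalate output.toList '\n'
  simpa using loop_eq output _ hL _ 0 rfl (by simp)
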